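-- pv_equiv track=rewrite | github.com/XGeffrier/FausseCommune | back/markov/markov_model.py | _nicer_output_name
-- ===== SOURCE A (Python) =====
-- def _nicer_output_name(name: str) -> str:
--     """
--     Improve the output name to make it more realistic for France.
--     """
--     LOWERCASE_WORDS = ('a', 'au', 'aux', 'd', 'de', 'del', 'dels', 'derriere', 'des', 'deux', 'devant', 'di', 'dit',
--                        'du', 'en', 'entre', 'environs', 'es', 'es', 'et', 'ez', 'h', 'huis', 'l', 'la', 'las', 'le',
--                        'les', 'les', 'lez', 'nouvelle', 'o', 'plages', 'pres', 'sans', 'ses', 'sous', 'sur')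
--     words = name.split()
--
--     # la ferté sur loing -> La Ferté sur Loing
--     words = [word.title()
--              if (len(word) > 2 and word not in LOWERCASE_WORDS) or i == 0
--              else word
--              for i, word in enumerate(words)]
--
--     # Le Cleac h -> Le Cleac'h
--     to_merge = [ix - 1 for ix, word in enumerate(words) if word == "h" and ix != 0]
--     for ix in to_merge[::-1]:
--         words[ix] = "'".join((words[ix], words[ix + 1]))
--         del words[ix + 1]
--
--     # Saint Martin l Abbaye -> Saint Martin l'Abbaye
--     to_merge = [ix for ix, word in enumerate(words) if len(word) == 1 and ix < len(words) - 1]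
--     for ix in to_merge[::-1]:
--         words[ix] = "'".join((words[ix], words[ix + 1]))
--         del words[ix + 1]
--
--     # Saint Michel sur Garonne -> Saint-Michel-sur-Garonne
--     name = '-'.join(words)
--
--     return name
-- ===== SOURCE B (Python) =====
-- def _nicer_output_name(name: str) -> str:
--     """
--     Improve the output name to make it more realistic for France.
--     (Forward-scan re-implementation: single left-to-right passes replace the
--     index-list + backward-deletion cascades.)
--     """
--     LOWERCASE_WORDS = ('a', 'au', 'aux', 'd', 'de', 'del', 'dels', 'derriere', 'des', 'deux', 'devant', 'di', 'dit',
--                        'du', 'en', 'entre', 'environs', 'es', 'es', 'et', 'ez', 'h', 'huis', 'l', 'la', 'las', 'le',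
--                        'les', 'les', 'lez', 'nouvelle', 'o', 'plages', 'pres', 'sans', 'ses', 'sous', 'sur')
--     words = [word.title()
--              if (len(word) > 2 and word not in LOWERCASE_WORDS) or i == 0
--              else word
--              for i, word in enumerate(name.split())]
--
--     # Le Cleac h -> Le Cleac'h : a non-initial "h" attaches to the token before it
--     merged = []
--     for word in words:
--         if word == "h" and merged:
--             merged[-1] += "'" + word
--         else:
--             merged.append(word)
--
--     # Saint Martin l Abbaye -> Saint Martin l'Abbaye : a single-letter word (not last)
--     # starts a chain that absorbs following words until one that is not a single letter
--     # (or the final word) terminates it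
--     out = []
--     i = 0
--     n = len(merged)
--     while i < n:
--         token = merged[i]
--         if len(token) == 1 and i < n - 1:
--             j = i + 1
--             while j < n - 1 and len(merged[j]) == 1:
--                 token += "'" + merged[j]
--                 j += 1
--             token += "'" + merged[j]
--             i = j + 1
--         else:
--             i += 1
--         out.append(token)
--     return '-'.join(out)
-- ===== Notes on version B (the rewrite author's own statement) =====
-- stated objective: alternative
-- what changed: Replaces A's two index-list + backward in-place-deletion merge cascades with single forward scans: the h-merge appends each matching word to the previously emitted token, and each single-letter word starts a forward chain that absorbs following words until a non-single-letter (or final) terminator.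
import Mathlib
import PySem

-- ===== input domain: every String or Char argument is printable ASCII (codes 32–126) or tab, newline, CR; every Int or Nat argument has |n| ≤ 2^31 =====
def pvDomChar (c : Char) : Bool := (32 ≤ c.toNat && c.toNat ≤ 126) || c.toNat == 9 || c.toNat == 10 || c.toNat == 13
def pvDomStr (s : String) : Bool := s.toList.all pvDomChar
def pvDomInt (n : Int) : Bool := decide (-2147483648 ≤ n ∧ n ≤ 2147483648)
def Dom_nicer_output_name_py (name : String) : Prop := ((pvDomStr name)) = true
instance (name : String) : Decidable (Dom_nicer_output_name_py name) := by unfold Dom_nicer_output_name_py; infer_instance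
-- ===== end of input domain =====

-- B replaces A's index-list + backward-deletion merge cascades by single forward scans
-- (h-words attach to the previously emitted token; single-letter words grow a forward chain);
-- objective: alternative (same result, no index bookkeeping or in-place deletion).

-- ===== PORT A =====
-- helpers shared by both Pythons: the LOWERCASE_WORDS tuple and the identical title-case
-- list comprehension (str.title ported by hand, exact on the ASCII domain: a letter after a
-- non-letter is uppercased, a letter after a letter is lowercased)
def pvLowercaseWords : List String :=
  ["a", "au", "aux", "d", "de", "del", "dels", "derriere", "des", "deux", "devant", "di", "dit",
   "du", "en", "entre", "environs", "es", "es", "et", "ez", "h", "huis", "l", "la", "las", "le",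
   "les", "les", "lez", "nouvelle", "o", "plages", "pres", "sans", "ses", "sous", "sur"]

def pvTitleChars : List Char → Bool → List Char
  | [], _ => []
  | c :: cs, prevCased =>
    if PySem.Chars.isalpha c then
      (if prevCased then PySem.Chars.lowerChar c else PySem.Chars.upperChar c) :: pvTitleChars cs true
    else c :: pvTitleChars cs false

def pvTitle (s : String) : String := String.ofList (pvTitleChars s.toList false)

def pvTitleWord (i : Int) (w : String) : String :=
  if (PySem.Str.len w > 2 ∧ w ∉ pvLowercaseWords) ∨ i = 0 then pvTitle w else w

def pvTitled (ws : List String) : List String :=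
  (PySem.List.enumerate ws).map fun p => pvTitleWord p.1 p.2

-- words[ix] = "'".join((words[ix], words[ix + 1])); del words[ix + 1]
-- (getD is safe: A only ever uses indices < len(words) - 1, built by the filters below)
def pvMergeAt (ws : List String) (ix : Nat) : List String :=
  ws.take ix ++ [PySem.Str.join "'" [ws.getD ix "", ws.getD (ix + 1) ""]] ++ ws.drop (ix + 2)

-- to_merge = [ix - 1 for ix, word in enumerate(words) if word == "h" and ix != 0]
-- (enumerate indices are ≥ 0 and ix ≠ 0, so .toNat of ix - 1 is exact)
def pvToMergeH (ws : List String) : List Nat :=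
  (PySem.List.enumerate ws).filterMap fun p =>
    if p.2 = "h" ∧ p.1 ≠ 0 then some ((p.1 - 1).toNat) else none

-- for ix in to_merge[::-1]: …   (step -1 ≠ 0, so slice? is always some)
def pvHPassA (ws : List String) : List String :=
  ((PySem.List.slice? (pvToMergeH ws) none none (-1)).getD []).foldl pvMergeAt ws

-- to_merge = [ix for ix, word in enumerate(words) if len(word) == 1 and ix < len(words) - 1]
def pvToMergeS (ws : List String) : List Nat :=
  (PySem.List.enumerate ws).filterMap fun p =>
    if PySem.Str.len p.2 = 1 ∧ p.1 < (ws.length : Int) - 1 then some p.1.toNat else none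

def pvSPassA (ws : List String) : List String :=
  ((PySem.List.slice? (pvToMergeS ws) none none (-1)).getD []).foldl pvMergeAt ws

def nicer_output_name_py (name : String) : String :=
  PySem.Str.join "-" (pvSPassA (pvHPassA (pvTitled (PySem.Str.split₀ name))))

-- ===== PORT B =====
-- forward h-merge: merged[-1] += "'" + word  (only taken when merged is nonempty)
def pvHStep (acc : List String) (w : String) : List String :=
  if w = "h" ∧ acc ≠ [] then acc.dropLast ++ [acc.getLast?.getD "" ++ "'" ++ w] else acc ++ [w]

def pvHPassB (ws : List String) : List String := ws.foldl pvHStep []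

mutual
-- the inner while loop: keep absorbing single-letter words, then absorb the terminator
def pvChainB : String → List String → List String
  | acc, [] => [acc]          -- unreachable: the chain is always entered with a nonempty rest
  | acc, v :: vs =>
    if PySem.Str.len v = 1 ∧ vs ≠ [] then pvChainB (acc ++ "'" ++ v) vs
    else (acc ++ "'" ++ v) :: pvSPassB vs

def pvSPassB : List String → List String
  | [] => []
  | w :: ws => if PySem.Str.len w = 1 ∧ ws ≠ [] then pvChainB w ws else w :: pvSPassB ws
end

def nicer_output_name_py_alt (name : String) : String :=
  PySem.Str.join "-" (pvSPassB (pvHPassB (pvTitled (PySem.Str.split₀ name))))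

-- ===== PRECONDITION & SPEC =====
def Spec_nicer_output_name_py (name : String) (out : String) : Prop := out = nicer_output_name_py_alt name
instance (name : String) (out : String) : Decidable (Spec_nicer_output_name_py name out) := by unfold Spec_nicer_output_name_py; infer_instance

-- ===== CLAIM (what is proved, stated in full; the proofs are below) =====
def Claim_equal_nicer_output_name_py : Prop := ∀ (name : String), Dom_nicer_output_name_py name → Spec_nicer_output_name_py name (nicer_output_name_py name)

-- ===== LEMMAS AND PROOFS =====

-- positions of "h" in a list of words
def pvHPos : List String → List Nat
  | [] => []
  | w :: t => (if w = "h" then [0] else []) ++ (pvHPos t).map (· + 1)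

-- positions < m of single-letter words
def pvSPos : List String → Nat → List Nat
  | [], _ => []
  | w :: t, m => (if PySem.Str.len w = 1 ∧ 0 < m then [0] else []) ++ (pvSPos t (m - 1)).map (· + 1)

-- common specification of the h-merge: pvG cur l processes l with cur the pending token
def pvG : String → List String → List String
  | cur, [] => [cur]
  | cur, w :: t => if w = "h" then pvG (cur ++ "'" ++ w) t else cur :: pvG w t

lemma pvJoinPair (a b : String) : PySem.Str.join "'" [a, b] = a ++ "'" ++ b := by
  apply String.toList_injective
  simp [PySem.Str.join, PySem.Chars.join, List.intercalate, List.intersperse]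

lemma pvMergeAt_zero (x y : String) (r : List String) :
    pvMergeAt (x :: y :: r) 0 = (x ++ "'" ++ y) :: r := by
  simp [pvMergeAt, pvJoinPair]

lemma pvMergeAt_succ (a : String) (l : List String) (j : Nat) :
    pvMergeAt (a :: l) (j + 1) = a :: pvMergeAt l j := by
  simp [pvMergeAt]

lemma pvFoldl_mergeAt_shift (is : List Nat) (a : String) (l : List String) :
    (is.map (· + 1)).foldl pvMergeAt (a :: l) = a :: is.foldl pvMergeAt l := by
  induction is generalizing l with
  | nil => simp
  | cons j t ih => simp [List.foldl_cons, pvMergeAt_succ, ih]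

lemma pvRevFold (c : Bool) (is : List Nat) (a : String) (l : List String) :
    List.foldl pvMergeAt (a :: l) (((if c then [0] else []) ++ is.map (· + 1)).reverse)
    = if c then pvMergeAt (a :: List.foldl pvMergeAt l is.reverse) 0
      else a :: List.foldl pvMergeAt l is.reverse := by
  cases c <;>
    simp [List.foldl_append, ← List.map_reverse, pvFoldl_mergeAt_shift]

lemma pvToMergeH_gen (l : List String) (s : Nat) :
    (PySem.List.enumerate l ((s : Int) + 1)).filterMap
        (fun p => if p.2 = "h" ∧ p.1 ≠ 0 then some ((p.1 - 1).toNat) else none)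
    = (pvHPos l).map (· + s) := by
  induction l generalizing s with
  | nil => simp [PySem.List.enumerate, pvHPos]
  | cons w t ih =>
    rw [PySem.List.enumerate_cons]
    have hne : ((s : Int) + 1) ≠ 0 := by omega
    have hcast : ((s : Int) + 1 + 1) = ((s + 1 : Nat) : Int) + 1 := by push_cast; ring
    have hstep : ∀ j : Nat, j + 1 + s = j + (s + 1) := by omega
    rw [List.filterMap_cons, hcast, ih (s + 1)]
    by_cases hw : w = "h" <;>
      simp [hw, hne, pvHPos, List.map_map, hstep]

lemma pvToMergeH_cons (a : String) (l : List String) :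
    pvToMergeH (a :: l) = pvHPos l := by
  unfold pvToMergeH
  rw [PySem.List.enumerate_cons, List.filterMap_cons]
  have h0 : ((0 : Int) + 1) = ((0 : Nat) : Int) + 1 := by norm_num
  rw [h0, pvToMergeH_gen l 0]
  simp

lemma pvHPassA_nil : pvHPassA [] = [] := by
  simp [pvHPassA, pvToMergeH, PySem.List.enumerate, PySem.List.slice?_none_none_neg_one]

lemma pvHPassA_single (a : String) : pvHPassA [a] = [a] := by
  simp [pvHPassA, pvToMergeH_cons, pvHPos, PySem.List.slice?_none_none_neg_one]

lemma pvHPassA_cons (a w : String) (t : List String) :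
    pvHPassA (a :: w :: t)
    = if w = "h" then pvMergeAt (a :: pvHPassA (w :: t)) 0 else a :: pvHPassA (w :: t) := by
  unfold pvHPassA
  rw [pvToMergeH_cons, pvToMergeH_cons, PySem.List.slice?_none_none_neg_one,
    PySem.List.slice?_none_none_neg_one]
  show List.foldl pvMergeAt (a :: w :: t) (pvHPos (w :: t)).reverse = _
  have : pvHPos (w :: t) = (if w = "h" then [0] else []) ++ (pvHPos t).map (· + 1) := rfl
  rw [this]
  by_cases hw : w = "h"
  · simpa [hw] using pvRevFold true (pvHPos t) a (w :: t)
  · simpa [hw] using pvRevFold false (pvHPos t) a (w :: t)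

lemma pvG_merge (l : List String) : ∀ s cur : String,
    pvMergeAt (cur :: pvG s l) 0 = pvG (cur ++ "'" ++ s) l := by
  induction l with
  | nil => intro s cur; simp [pvG, pvMergeAt_zero]
  | cons w t ih =>
    intro s cur
    by_cases hw : w = "h"
    · subst hw
      show pvMergeAt (cur :: pvG s ("h" :: t)) 0 = _
      have h1 : pvG s ("h" :: t) = pvG (s ++ "'" ++ "h") t := by simp [pvG]
      have h2 : pvG (cur ++ "'" ++ s) ("h" :: t) = pvG ((cur ++ "'" ++ s) ++ "'" ++ "h") t := by
        simp [pvG]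
      rw [h1, h2, ih]
      congr 1
      simp [String.append_assoc]
    · simp [pvG, hw, pvMergeAt_zero]

lemma pvHPassA_eq_G (l : List String) : ∀ a : String, pvHPassA (a :: l) = pvG a l := by
  induction l with
  | nil => intro a; simpa [pvG] using pvHPassA_single a
  | cons w t ih =>
    intro a
    rw [pvHPassA_cons]
    by_cases hw : w = "h"
    · subst hw
      rw [if_pos rfl, ih "h", pvG_merge]
      simp [pvG]
    · rw [if_neg hw, ih w]
      simp [pvG, hw]

lemma pvHFoldB (l : List String) : ∀ (acc : List String) (cur : String),
    List.foldl pvHStep (acc ++ [cur]) l = acc ++ pvG cur l := by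
  induction l with
  | nil => intro acc cur; simp [pvG]
  | cons w t ih =>
    intro acc cur
    by_cases hw : w = "h"
    · rw [List.foldl_cons]
      have hstep : pvHStep (acc ++ [cur]) w = acc ++ [cur ++ "'" ++ w] := by
        simp [pvHStep, hw]
      rw [hstep, ih]
      subst hw
      simp [pvG]
    · rw [List.foldl_cons]
      have hstep : pvHStep (acc ++ [cur]) w = (acc ++ [cur]) ++ [w] := by
        simp [pvHStep, hw]
      rw [hstep, ih (acc ++ [cur]) w]
      simp [pvG, hw]

lemma pvHPassB_cons (a : String) (l : List String) : pvHPassB (a :: l) = pvG a l := by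
  unfold pvHPassB
  rw [List.foldl_cons]
  have h0 : pvHStep [] a = [] ++ [a] := by simp [pvHStep]
  rw [h0, pvHFoldB l [] a]
  simp

lemma pvPass1_eq (l : List String) : pvHPassA l = pvHPassB l := by
  cases l with
  | nil => rw [pvHPassA_nil]; rfl
  | cons a t => rw [pvHPassA_eq_G, pvHPassB_cons]

lemma pvToMergeS_gen (l : List String) : ∀ s n : Nat,
    (PySem.List.enumerate l (s : Int)).filterMap
        (fun p => if PySem.Str.len p.2 = 1 ∧ p.1 < (n : Int) then some p.1.toNat else none)
    = (pvSPos l (n - s)).map (· + s) := by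
  induction l with
  | nil => intro s n; simp [PySem.List.enumerate, pvSPos]
  | cons w t ih =>
    intro s n
    rw [PySem.List.enumerate_cons, List.filterMap_cons]
    have hcast : ((s : Int) + 1) = ((s + 1 : Nat) : Int) := by push_cast; ring
    have hm : n - (s + 1) = (n - s) - 1 := by omega
    have hstep : ∀ j : Nat, j + 1 + s = j + (s + 1) := by omega
    rw [hcast, ih (s + 1) n, hm]
    by_cases hw : w.length = 1
    · by_cases hs : s < n
      · have hns : 0 < n - s := by omega
        simp [hw, hs, hns, pvSPos, List.map_map, hstep]
      · have hns : ¬ 0 < n - s := by omega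
        simp [hw, hs, hns, pvSPos, List.map_map, hstep]
    · simp [hw, pvSPos, List.map_map, hstep]

lemma pvToMergeS_cons (a : String) (t : List String) :
    pvToMergeS (a :: t) = pvSPos (a :: t) t.length := by
  unfold pvToMergeS
  have hfun : (fun p : Int × String =>
      if PySem.Str.len p.2 = 1 ∧ p.1 < ((a :: t).length : Int) - 1 then some p.1.toNat else none)
      = (fun p : Int × String =>
      if PySem.Str.len p.2 = 1 ∧ p.1 < ((t.length : Nat) : Int) then some p.1.toNat else none) := by
    funext p
    have : ((a :: t).length : Int) - 1 = ((t.length : Nat) : Int) := by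
      simp [List.length_cons]
    rw [this]
  rw [hfun]
  have h0 : PySem.List.enumerate (a :: t) = PySem.List.enumerate (a :: t) (((0 : Nat) : Int)) := by
    norm_num
  rw [h0, pvToMergeS_gen (a :: t) 0 t.length]
  simp

lemma pvToMergeS_nil : pvToMergeS [] = [] := rfl

lemma pvSPassA_nil : pvSPassA [] = [] := by
  simp [pvSPassA, pvToMergeS_nil, PySem.List.slice?_none_none_neg_one]

lemma pvSPassA_cons (a : String) (t : List String) :
    pvSPassA (a :: t)
    = if PySem.Str.len a = 1 ∧ t ≠ [] then pvMergeAt (a :: pvSPassA t) 0 else a :: pvSPassA t := by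
  cases t with
  | nil =>
    simp [pvSPassA, pvToMergeS_cons, pvToMergeS_nil, pvSPos, PySem.List.slice?_none_none_neg_one]
  | cons w u =>
    unfold pvSPassA
    rw [pvToMergeS_cons, pvToMergeS_cons, PySem.List.slice?_none_none_neg_one,
      PySem.List.slice?_none_none_neg_one]
    show List.foldl pvMergeAt (a :: w :: u) (pvSPos (a :: w :: u) (w :: u).length).reverse = _
    have hlen : (w :: u).length - 1 = u.length := by simp
    have hrec : pvSPos (a :: w :: u) (w :: u).length
        = (if PySem.Str.len a = 1 ∧ 0 < (w :: u).length then [0] else [])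
          ++ (pvSPos (w :: u) u.length).map (· + 1) := by
      show (if PySem.Str.len a = 1 ∧ 0 < (w :: u).length then [0] else [])
          ++ (pvSPos (w :: u) ((w :: u).length - 1)).map (· + 1) = _
      rw [hlen]
    rw [hrec]
    by_cases ha : a.length = 1
    · have hc : PySem.Str.len a = 1 ∧ 0 < (w :: u).length := ⟨by simp [ha], by simp⟩
      have hc2 : PySem.Str.len a = 1 ∧ (w :: u) ≠ [] := ⟨by simp [ha], by simp⟩
      rw [if_pos hc, if_pos hc2]
      simpa using pvRevFold true (pvSPos (w :: u) u.length) a (w :: u)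
    · have hc : ¬ (PySem.Str.len a = 1 ∧ 0 < (w :: u).length) := by simp [ha]
      have hc2 : ¬ (PySem.Str.len a = 1 ∧ (w :: u) ≠ []) := by simp [ha]
      rw [if_neg hc, if_neg hc2]
      simpa using pvRevFold false (pvSPos (w :: u) u.length) a (w :: u)

lemma pvChainB_merge (vs : List String) : ∀ (v acc cur : String),
    pvMergeAt (cur :: pvChainB acc (v :: vs)) 0 = pvChainB (cur ++ "'" ++ acc) (v :: vs) := by
  induction vs with
  | nil =>
    intro v acc cur
    simp [pvChainB, pvSPassB, pvMergeAt_zero, String.append_assoc]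
  | cons u us ih =>
    intro v acc cur
    by_cases hv : v.length = 1
    · have h1 : pvChainB acc (v :: u :: us) = pvChainB (acc ++ "'" ++ v) (u :: us) := by
        simp [pvChainB, hv]
      have h2 : pvChainB (cur ++ "'" ++ acc) (v :: u :: us)
          = pvChainB ((cur ++ "'" ++ acc) ++ "'" ++ v) (u :: us) := by
        simp [pvChainB, hv]
      rw [h1, h2, ih]
      congr 1
      simp [String.append_assoc]
    · simp [pvChainB, hv, pvMergeAt_zero, String.append_assoc]

lemma pvSPassB_merge (ws : List String) (w cur : String) :
    pvMergeAt (cur :: pvSPassB (w :: ws)) 0 = pvChainB cur (w :: ws) := by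
  by_cases hc : w.length = 1 ∧ ws ≠ []
  · obtain ⟨hw, hne⟩ := hc
    cases ws with
    | nil => exact absurd rfl hne
    | cons v vs =>
      have h1 : pvSPassB (w :: v :: vs) = pvChainB w (v :: vs) := by
        simp [pvSPassB, hw]

      have h2 : pvChainB cur (w :: v :: vs) = pvChainB (cur ++ "'" ++ w) (v :: vs) := by
        simp [pvChainB, hw]
      rw [h1, h2, pvChainB_merge]
  · have h1 : pvSPassB (w :: ws) = w :: pvSPassB ws := by
      cases ws with
      | nil => simp [pvSPassB]
      | cons v vs =>
        have hw : ¬ w.length = 1 := fun h => hc ⟨h, by simp⟩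
        simp [pvSPassB, hw]
    have h2 : pvChainB cur (w :: ws) = (cur ++ "'" ++ w) :: pvSPassB ws := by
      cases ws with
      | nil => simp [pvChainB, pvSPassB]
      | cons v vs =>
        have hw : ¬ w.length = 1 := fun h => hc ⟨h, by simp⟩
        simp [pvChainB, hw]
    rw [h1, h2, pvMergeAt_zero]

lemma pvPass2_eq (l : List String) : pvSPassA l = pvSPassB l := by
  induction l with
  | nil => rw [pvSPassA_nil]; rfl
  | cons a t ih =>
    rw [pvSPassA_cons, ih]
    by_cases hc : a.length = 1 ∧ t ≠ []
    · obtain ⟨ha, hne⟩ := hc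
      cases t with
      | nil => exact absurd rfl hne
      | cons w ws =>
        rw [if_pos ⟨by simp [ha], by simp⟩, pvSPassB_merge]
        simp [pvSPassB, ha]
    · have hc' : ¬ (PySem.Str.len a = 1 ∧ t ≠ []) := by
        simpa using hc
      rw [if_neg hc']
      cases t with
      | nil => simp [pvSPassB]
      | cons w ws =>
        have ha : ¬ a.length = 1 := fun h => hc ⟨h, by simp⟩
        simp [pvSPassB, ha]

-- ===== VERDICT (by name: the statement is the Claim_ definition above) =====
theorem nicer_output_name_py_spec : Claim_equal_nicer_output_name_py := by
  intro name _
  unfold Spec_nicer_output_name_py nicer_output_name_py nicer_output_name_py_alt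
  rw [pvPass1_eq, pvPass2_eq]
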